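-- pv_equiv track=rewrite | github.com/hasifumi/pad_auto | pazdracombo.py | str2lst
-- ===== SOURCE A (Python) =====
-- def str2lst(param, width, height):# {{{
--     ret = [[0 for col in range(width)] for row in range(height)]
--     if len(param) == width * height:
--         i = 0
--         for h in range(height):
--             for w in range(width):
--                 ret[h][w] = param[i]
--                 i += 1
--     #print ret
--     return ret# }}}
-- ===== SOURCE B (Python) =====
-- def str2lst(param, width, height):
--     if len(param) == width * height:
--         return [list(param[h * width:(h + 1) * width]) for h in range(height)]
--     return [[0] * width for _ in range(height)]
-- ===== Notes on version B (the rewrite author's own statement) =====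
-- stated objective: simpler
-- what changed: B cuts the flat string into consecutive width-sized slices, one per row, instead of pre-building a zero grid and overwriting it cell by cell with a running index counter in nested loops.
-- outside the precondition, e.g. on str2lst('x', 2, 2): A returns [[0, 0], [0, 0]], B returns [[0, 0], [0, 0]]
import Mathlib
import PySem

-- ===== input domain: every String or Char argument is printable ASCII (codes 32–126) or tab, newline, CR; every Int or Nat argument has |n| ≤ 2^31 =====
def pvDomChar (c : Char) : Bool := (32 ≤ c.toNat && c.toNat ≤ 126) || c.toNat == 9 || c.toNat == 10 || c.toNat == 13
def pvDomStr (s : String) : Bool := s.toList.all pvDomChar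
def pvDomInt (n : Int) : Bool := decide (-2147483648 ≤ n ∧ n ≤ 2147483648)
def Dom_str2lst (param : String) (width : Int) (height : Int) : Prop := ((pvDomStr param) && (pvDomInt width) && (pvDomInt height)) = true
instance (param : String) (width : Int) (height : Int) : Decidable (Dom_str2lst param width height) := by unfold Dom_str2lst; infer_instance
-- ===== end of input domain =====

-- B replaces A's index-counter mutation of a pre-built zero grid by slicing the flat string into
-- consecutive width-sized rows (objective: simpler). Equal on Pre_ (where A's value fits the type).


-- ===== PORT A =====
-- param[i] as a 1-char string; in range on every access under A's length guard
def cellStr (L : List Char) (i : Int) : String :=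
  ((PySem.List.pyGet? L i).map (fun c => String.ofList [c])).getD ""

def str2lst (param : String) (width : Int) (height : Int) : List (List String) :=
  -- Python fills `ret` with the int 0, which the return type List (List String) cannot hold;
  -- Pre_str2lst excludes exactly the inputs on which a 0 cell survives to the output, so the
  -- placeholder "" used here is never observable inside Pre_.
  let ret : List (List String) :=
    (PySem.List.pyRange 0 height 1).map (fun _ => (PySem.List.pyRange 0 width 1).map (fun _ => ""))
  if (PySem.Str.len param : Int) = width * height then
    ((PySem.List.pyRange 0 height 1).foldl (fun (st : List (List String) × Int) h =>
      (PySem.List.pyRange 0 width 1).foldl (fun (st : List (List String) × Int) w =>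
        -- ret[h][w] = param[i]; i += 1   (h, w come from range so are nonnegative: .toNat is exact)
        (st.1.set h.toNat ((st.1.getD h.toNat []).set w.toNat (cellStr param.toList st.2)),
         st.2 + 1)) st) (ret, 0)).1
  else ret

-- ===== PORT B =====
def str2lst_alt (param : String) (width : Int) (height : Int) : List (List String) :=
  if (PySem.Str.len param : Int) = width * height then
    (PySem.List.pyRange 0 height 1).map (fun h =>
      (PySem.List.slice param.toList (some (h * width)) (some ((h + 1) * width))).map
        (fun c => String.ofList [c]))
  else
    -- [0]*width: Python list repetition is empty for width ≤ 0, exactly as replicate width.toNat;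
    -- the int 0 cell is outside the return type and outside Pre_str2lst (see above), "" stands in.
    (PySem.List.pyRange 0 height 1).map (fun _ => List.replicate width.toNat "")

-- ===== PRECONDITION & SPEC =====
-- Pre_ excludes the inputs with len(param) ≠ width*height while width > 0 and height > 0, on which
-- A returns a grid holding the int 0 — not a value of the declared type List (List String).
def Pre_str2lst (param : String) (width : Int) (height : Int) : Prop :=
  (PySem.Str.len param : Int) = width * height ∨ width ≤ 0 ∨ height ≤ 0
instance (param : String) (width : Int) (height : Int) : Decidable (Pre_str2lst param width height) := by
  unfold Pre_str2lst; infer_instance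

def pvWitness_str2lst : String × Int × Int := ("abcdef", 3, 2)

def Spec_str2lst (param : String) (width : Int) (height : Int) (out : List (List String)) : Prop := out = str2lst_alt param width height
instance (param : String) (width : Int) (height : Int) (out : List (List String)) : Decidable (Spec_str2lst param width height out) := by unfold Spec_str2lst; infer_instance

-- ===== CLAIM (what is proved, stated in full; the proofs are below) =====
def Claim_equal_str2lst : Prop := ∀ (param : String) (width : Int) (height : Int), Dom_str2lst param width height → Pre_str2lst param width height → Spec_str2lst param width height (str2lst param width height)

-- ===== LEMMAS AND PROOFS =====

-- A's fresh row of `width` zero cells (as the "" placeholder, see the port comment)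
def blankRow (W : Nat) : List String := (List.range W).map (fun _ => "")

-- the intended h-th row: the cells at flat indices h*W, …, h*W + W - 1
def rowOf (L : List Char) (W hn : Nat) : List String :=
  (List.range W).map (fun w => cellStr L ((hn * W + w : Nat) : Int))

theorem set_of_getElem? {α : Type} (xs : List α) (n : Nat) (x : α) (h : xs[n]? = some x) :
    xs.set n x = xs := by
  apply List.ext_getElem?
  intro i
  rw [List.getElem?_set]
  split
  · next he => subst he; rw [if_pos (List.getElem?_eq_some_iff.mp h).1, h]
  · rfl

-- A's inner loop: writes cells i, i+1, ... into row hn of the grid, left to right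
theorem inner_loop (L : List Char) (hn : Nat) (n : Nat) :
    ∀ (grid : List (List String)) (row : List String) (i : Int),
      grid[hn]? = some row → n ≤ row.length →
      (List.range n).foldl
        (fun (st : List (List String) × Int) w =>
          (st.1.set hn ((st.1.getD hn []).set w (cellStr L st.2)), st.2 + 1)) (grid, i)
      = (grid.set hn (((List.range n).map fun (w : Nat) => cellStr L (i + (w : Int))) ++ row.drop n),
         i + n) := by
  induction n with
  | zero =>
    intro grid row i hrow _
    simp [set_of_getElem? grid hn row hrow]
  | succ n ih =>
    intro grid row i hrow hlen
    have hlt : hn < grid.length := (List.getElem?_eq_some_iff.mp hrow).1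
    have hn_row : n < row.length := by omega
    rw [List.range_succ, List.foldl_append, ih grid row i hrow (by omega)]
    simp only [List.foldl_cons, List.foldl_nil]
    have hgetD :
        (grid.set hn (((List.range n).map fun (w : Nat) => cellStr L (i + (w : Int))) ++ row.drop n)).getD hn []
        = ((List.range n).map fun (w : Nat) => cellStr L (i + (w : Int))) ++ row.drop n := by
      simp [List.getD, hlt]
    rw [hgetD, List.set_set]
    simp only [Prod.mk.injEq]
    refine ⟨?_, by push_cast; ring⟩
    congr 1
    have hplen : ((List.range n).map fun (w : Nat) => cellStr L (i + (w : Int))).length = n := by simp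
    rw [List.drop_eq_getElem_cons hn_row, List.set_append]
    rw [if_neg (by omega)]
    simp only [hplen, Nat.sub_self]
    rw [List.set_cons_zero]
    simp

-- A's outer loop: after k rows the first k rows hold their slice of cells, i = k*W
theorem outer_loop (L : List Char) (W H : Nat) (k : Nat) (hk : k ≤ H) :
    (List.range k).foldl
      (fun (st : List (List String) × Int) hn =>
        (List.range W).foldl
          (fun (st : List (List String) × Int) w =>
            (st.1.set hn ((st.1.getD hn []).set w (cellStr L st.2)), st.2 + 1)) st)
      ((List.range H).map (fun _ => blankRow W), 0)
    = ((List.range H).map (fun hn => if hn < k then rowOf L W hn else blankRow W),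
       ((k * W : Nat) : Int)) := by
  induction k with
  | zero => simp
  | succ k ih =>
    rw [List.range_succ, List.foldl_append, ih (by omega)]
    simp only [List.foldl_cons, List.foldl_nil]
    have hrow : ((List.range H).map
        (fun hn => if hn < k then rowOf L W hn else blankRow W))[k]? = some (blankRow W) := by
      simp [Nat.lt_of_succ_le hk]
    rw [inner_loop L k W _ (blankRow W) _ hrow (by simp [blankRow])]
    simp only [Prod.mk.injEq]
    constructor
    · rw [show (blankRow W).drop W = [] by simp [blankRow]]
      apply List.ext_getElem
      · simp
      · intro j h1 h2
        simp only [List.length_set, List.length_map, List.length_range] at h1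
        rw [List.getElem_set]
        simp only [List.getElem_map, List.getElem_range]
        split_ifs with e1 e2 e3 e3
        all_goals try rfl
        all_goals try omega
        all_goals subst e1
        all_goals simp only [List.append_nil, rowOf]
        all_goals apply List.map_congr_left
        all_goals intro w _
        all_goals congr 1
    · push_cast; ring

-- B's h-th slice is exactly the intended h-th row
theorem row_slice (L : List Char) (W H hn : Nat) (hL : L.length = W * H) (hhn : hn < H) :
    (PySem.List.slice L (some ((hn : Int) * (W : Int))) (some (((hn : Int) + 1) * (W : Int)))).map
        (fun c => String.ofList [c])
    = rowOf L W hn := by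
  have h1 : (hn : Int) * (W : Int) = ((hn * W : Nat) : Int) := by push_cast; ring
  have h2 : ((hn : Int) + 1) * (W : Int) = ((hn * W : Nat) : Int) + ((W : Nat) : Int) := by
    push_cast; ring
  rw [h1, h2, PySem.List.slice_natCast_add]
  have hbound : hn * W + W ≤ L.length := by
    rw [hL]
    calc hn * W + W = (hn + 1) * W := by ring
    _ ≤ H * W := Nat.mul_le_mul_right W hhn
    _ = W * H := Nat.mul_comm H W
  apply List.ext_getElem
  · simp [rowOf]; omega
  · intro j h1' h2'
    simp only [List.length_map, List.length_take, List.length_drop] at h1'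
    simp only [rowOf, List.getElem_map, List.getElem_take, List.getElem_drop, List.getElem_range]
    have hj : hn * W + j < L.length := by omega
    simp only [cellStr]
    have hget : PySem.List.pyGet? L ((hn : Int) * (W : Int) + (j : Int)) = some L[hn * W + j] := by
      rw [show ((hn : Int) * (W : Int) + (j : Int)) = ((hn * W + j : Nat) : Int) by push_cast; ring,
        PySem.List.pyGet?_natCast, List.getElem?_eq_getElem hj]
    simp [hget]

-- ===== VERDICT (by name: the statement is the Claim_ definition above) =====
theorem str2lst_spec : Claim_equal_str2lst := by
  intro param width height _ hpre
  unfold Spec_str2lst str2lst str2lst_alt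
  by_cases hg : (PySem.Str.len param : Int) = width * height
  · rw [if_pos hg, if_pos hg]
    by_cases hH : height ≤ 0
    · rw [PySem.List.pyRange_one_eq_nil hH]; simp
    · push Not at hH
      have hW : 0 ≤ width := by
        by_contra hw
        push Not at hw
        have h1 : width * height < 0 := mul_neg_of_neg_of_pos hw hH
        have h2 : (0 : Int) ≤ (PySem.Str.len param : Int) := Int.natCast_nonneg _
        omega
      obtain ⟨W, rfl⟩ : ∃ W : Nat, width = (W : Int) := ⟨width.toNat, (Int.toNat_of_nonneg hW).symm⟩
      obtain ⟨H, rfl⟩ : ∃ H : Nat, height = (H : Int) :=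
        ⟨height.toNat, (Int.toNat_of_nonneg hH.le).symm⟩
      have hL : param.toList.length = W * H := by
        have := hg
        rw [PySem.Str.len_eq] at this
        exact_mod_cast this
      rw [PySem.List.pyRange_zero_natCast W, PySem.List.pyRange_zero_natCast H]
      simp only [List.foldl_map, List.map_map, Function.comp_def, Int.toNat_natCast]
      rw [show ((List.range H).map (fun _ : Nat => (List.range W).map (fun _ : Nat => "")))
            = (List.range H).map (fun _ => blankRow W) from rfl]
      rw [outer_loop param.toList W H H (le_refl H)]
      simp only
      apply List.map_congr_left
      intro hn hmem
      have hhn : hn < H := List.mem_range.mp hmem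
      rw [if_pos hhn, row_slice param.toList W H hn hL hhn]
  · rw [if_neg hg, if_neg hg]
    rcases hpre with hpre | hW | hH
    · exact absurd hpre hg
    · apply List.map_congr_left
      intro h _
      rw [PySem.List.pyRange_one_eq_nil hW, Int.toNat_of_nonpos hW]
      simp
    · rw [PySem.List.pyRange_one_eq_nil hH]
      simp
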